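-- pv_equiv track=rewrite | github.com/hjongc/Helios | helios/extractor.py | extract_here_doc_sql
-- ===== SOURCE A (Python) =====
-- from typing import Tuple
--
-- def extract_here_doc_sql(file_text: str) -> Tuple[str, bool]:
--     """
--     Extract SQL content from a shell script using a here-doc block that starts with
--     a line containing '<<!' and ends with a line that is exactly '!'.
--
--     Returns (sql_text, found).
--
--     한국어 주석: 쉘 스크립트에서 here-doc 구간만 추출합니다.
--     """
--     lines = file_text.splitlines()
--     in_block = False
--     buf: list[str] = []
--     for line in lines:
--         if not in_block:
--             if "<<!" in line:
--                 in_block = True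
--             continue
--         # in here-doc block
--         if line.strip() == "!":
--             # block ends
--             break
--         buf.append(line)
--     if not buf:
--         return "", False
--     return "\n".join(buf) + "\n", True
-- ===== SOURCE B (Python) =====
-- def extract_here_doc_sql(file_text):
--     lines = file_text.splitlines()
--     starts = [i for i, ln in enumerate(lines) if "<<!" in ln]
--     if not starts:
--         return "", False
--     s = starts[0]
--     ends = [i for i, ln in enumerate(lines) if ln.strip() == "!"]
--     e = next((k for k in ends if k > s), len(lines))
--     buf = lines[s + 1:e]
--     if not buf:
--         return "", False
--     return "\n".join(buf) + "\n", True
-- ===== Notes on version B (the rewrite author's own statement) =====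
-- stated objective: alternative
-- what changed: Replaces A's break-on-first-hit boolean state machine that accumulates lines with an index-precomputation approach: B builds the complete lists of marker-line and terminator-line indices via enumerate comprehensions, selects the start (first marker) and the end (first terminator index after the start, defaulting to the line count), and slices the lines between them.
import Mathlib
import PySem

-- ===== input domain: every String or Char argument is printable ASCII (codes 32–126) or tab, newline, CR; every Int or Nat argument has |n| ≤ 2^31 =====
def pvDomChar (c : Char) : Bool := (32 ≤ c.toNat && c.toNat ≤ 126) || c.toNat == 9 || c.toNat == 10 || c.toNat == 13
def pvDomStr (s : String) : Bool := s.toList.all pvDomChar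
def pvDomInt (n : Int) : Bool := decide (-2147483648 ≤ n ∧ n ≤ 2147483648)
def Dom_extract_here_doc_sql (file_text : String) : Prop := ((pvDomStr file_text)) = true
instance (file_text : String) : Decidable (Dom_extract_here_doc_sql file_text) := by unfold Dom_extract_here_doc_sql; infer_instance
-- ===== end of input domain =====

-- B replaces A's break-on-first-hit state machine by index precomputation: it builds the
-- full lists of '<<!'-marker and '!'-terminator line indices, picks the boundaries, and slices.

-- ===== PORT A =====
-- A's for-loop with in_block flag, buf accumulator and break, as structural recursion
def pvALoop : List String → Bool → List String → List String
  | [], _, buf => buf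
  | line :: rest, in_block, buf =>
    if !in_block then
      if PySem.Str.isIn "<<!" line then pvALoop rest true buf
      else pvALoop rest false buf
    else if PySem.Str.strip line == "!" then buf
    else pvALoop rest in_block (buf ++ [line])

def extract_here_doc_sql (file_text : String) : String × Bool :=
  let lines := PySem.Str.splitlines file_text
  let buf := pvALoop lines false []
  if buf.isEmpty then ("", false)
  else (PySem.Str.join "\n" buf ++ "\n", true)

-- ===== PORT B =====
-- [i for i, ln in enumerate(lines) if "<<!" in ln]
def pvStarts (lines : List String) : List Int :=
  (PySem.List.enumerate lines 0).filterMap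
    (fun p => if PySem.Str.isIn "<<!" p.2 then some p.1 else none)

-- [i for i, ln in enumerate(lines) if ln.strip() == "!"]
def pvEnds (lines : List String) : List Int :=
  (PySem.List.enumerate lines 0).filterMap
    (fun p => if PySem.Str.strip p.2 == "!" then some p.1 else none)

-- next((k for k in ends if k > s), default)
def pvFirstGt (ends : List Int) (s : Int) : Option Int :=
  match ends with
  | [] => none
  | k :: rest => if s < k then some k else pvFirstGt rest s

def extract_here_doc_sql_alt (file_text : String) : String × Bool :=
  let lines := PySem.Str.splitlines file_text
  match pvStarts lines with
  | [] => ("", false)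
  | s :: _ =>
    let e := (pvFirstGt (pvEnds lines) s).getD (lines.length : Int)
    let buf := PySem.List.slice lines (some (s + 1)) (some e)
    if buf.isEmpty then ("", false)
    else (PySem.Str.join "\n" buf ++ "\n", true)

-- ===== PRECONDITION & SPEC =====
def Spec_extract_here_doc_sql (file_text : String) (out : String × Bool) : Prop := out = extract_here_doc_sql_alt file_text
instance (file_text : String) (out : String × Bool) : Decidable (Spec_extract_here_doc_sql file_text out) := by unfold Spec_extract_here_doc_sql; infer_instance

-- ===== CLAIM (what is proved, stated in full; the proofs are below) =====
def Claim_equal_extract_here_doc_sql : Prop := ∀ (file_text : String), Dom_extract_here_doc_sql file_text → Spec_extract_here_doc_sql file_text (extract_here_doc_sql file_text)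

-- ===== LEMMAS AND PROOFS =====

-- proof-side: an index comprehension with an arbitrary predicate and enumeration offset
def pvIdxFrom (p : String → Bool) (s : Int) (lines : List String) : List Int :=
  (PySem.List.enumerate lines s).filterMap
    (fun q => if p q.2 then some q.1 else none)

theorem pvIdxFrom_cons (p : String → Bool) (s : Int) (x : String) (r : List String) :
    pvIdxFrom p s (x :: r) = (if p x then [s] else []) ++ pvIdxFrom p (s + 1) r := by
  simp only [pvIdxFrom, PySem.List.enumerate_cons, List.filterMap_cons]
  split_ifs <;> simp

-- the head of the index list is the offset plus the index of the first matching line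
theorem pvIdxFrom_head (p : String → Bool) (l : List String) : ∀ s : Int,
    (pvIdxFrom p s l).head? = (List.findIdx? p l).map (fun k => s + k) := by
  induction l with
  | nil => intro s; simp [pvIdxFrom]
  | cons x r ih =>
    intro s
    rw [pvIdxFrom_cons]
    by_cases h : p x
    · simp [h, List.findIdx?_cons]
    · rw [if_neg (by simp [h]), List.nil_append, ih (s + 1), List.findIdx?_cons,
        if_neg (by simp [h])]
      cases List.findIdx? p r with
      | none => simp
      | some k => simp; ring

-- when the threshold is below every enumerated index, pvFirstGt is just the head
theorem pvFirstGt_all_gt (p : String → Bool) (l : List String) : ∀ (s t : Int), t < s →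
    pvFirstGt (pvIdxFrom p s l) t = (pvIdxFrom p s l).head? := by
  induction l with
  | nil => intro s t _; simp [pvIdxFrom, pvFirstGt]
  | cons x r ih =>
    intro s t hts
    rw [pvIdxFrom_cons]
    by_cases h : p x
    · simp [h, pvFirstGt, hts]
    · rw [if_neg (by simp [h]), List.nil_append]
      exact ih (s + 1) t (by omega)

-- the selected end index: offset + start-index + 1 + first terminator index in the suffix
-- (List.findIdx returns the length when nothing matches, which is exactly the default)
theorem pvFirstGt_spec (p : String → Bool) (l : List String) : ∀ (s : Int) (i : Nat),
    i < l.length →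
    (pvFirstGt (pvIdxFrom p s l) (s + i)).getD (s + l.length) =
      s + i + 1 + List.findIdx p (l.drop (i + 1)) := by
  induction l with
  | nil => intro s i hi; exact absurd hi (by simp)
  | cons x r ih =>
    intro s i hi
    rw [pvIdxFrom_cons]
    cases i with
    | zero =>
      have hskip : ∀ b : List Int,
          pvFirstGt ((if p x then [s] else []) ++ b) (s + ((0:Nat):Int)) = pvFirstGt b s := by
        intro b
        split_ifs with h
        · simp [pvFirstGt]
        · simp
      rw [hskip]
      rw [pvFirstGt_all_gt p r (s + 1) s (by omega), pvIdxFrom_head]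
      cases hf : List.findIdx? p r with
      | none =>
        have hlen : List.findIdx p r = r.length := by
          simpa using List.findIdx?_eq_none_iff_findIdx_eq.mp hf
        simp [hlen]
        ring
      | some k =>
        have hk : List.findIdx p r = k := by
          have := List.findIdx?_eq_some_iff_findIdx_eq.mp hf
          omega
        simp [hk]
    | succ i' =>
      have hskip : ∀ b : List Int,
          pvFirstGt ((if p x then [s] else []) ++ b) (s + ((i' + 1 : Nat) : Int)) =
            pvFirstGt b (s + ((i' + 1 : Nat) : Int)) := by
        intro b
        split_ifs with h
        · simp only [List.cons_append, List.nil_append, pvFirstGt]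
          rw [if_neg (by push_cast; omega)]
        · simp
      rw [hskip]
      have harg : s + ((i' + 1 : Nat) : Int) = (s + 1) + ((i' : Nat) : Int) := by
        push_cast; ring
      have hlen : s + (((x :: r).length : Nat) : Int) = (s + 1) + ((r.length : Nat) : Int) := by
        simp; ring
      rw [harg, hlen, ih (s + 1) i' (by simpa using hi)]
      simp only [List.drop_succ_cons]

-- A's loop in the in_block phase collects the lines before the first terminator
theorem pvALoop_true (lines : List String) (buf : List String) :
    pvALoop lines true buf =
      buf ++ lines.takeWhile (fun x => !(PySem.Str.strip x == "!")) := by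
  induction lines generalizing buf with
  | nil => simp [pvALoop]
  | cons line rest ih =>
    simp only [pvALoop, List.takeWhile_cons]
    by_cases h : PySem.Str.strip line == "!"
    · simp [h]
    · simp [h, ih]

-- A's loop in the scanning phase: find the first '<<!' line, then enter the block phase
theorem pvALoop_false (lines : List String) (buf : List String) :
    pvALoop lines false buf =
      match List.findIdx? (fun x => PySem.Str.isIn "<<!" x) lines with
      | none => buf
      | some i => pvALoop (lines.drop (i + 1)) true buf := by
  induction lines with
  | nil => simp [pvALoop]
  | cons line rest ih =>
    simp only [pvALoop, List.findIdx?_cons]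
    by_cases h : PySem.Str.isIn "<<!" line
    · have h' : PySem.Chars.isIn ['<', '<', '!'] line.toList = true := by simpa using h
      simp [h']
    · have h' : PySem.Chars.isIn ['<', '<', '!'] line.toList = false := by simpa using h
      simp only [ih]
      cases hf : List.findIdx? (fun x => PySem.Str.isIn "<<!" x) rest <;> simp [h']

-- takeWhile as take-up-to-findIdx
theorem takeWhile_eq_take_findIdx (p : String → Bool) (l : List String) :
    l.takeWhile (fun x => !(p x)) = l.take (List.findIdx p l) := by
  induction l with
  | nil => simp
  | cons x r ih =>
    simp only [List.takeWhile_cons, List.findIdx_cons]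
    by_cases h : p x
    · simp [h]
    · simp [h, ih]

-- ===== VERDICT (by name: the statement is the Claim_ definition above) =====
theorem extract_here_doc_sql_spec : Claim_equal_extract_here_doc_sql := by
  intro file_text _
  unfold Spec_extract_here_doc_sql
  show extract_here_doc_sql file_text = extract_here_doc_sql_alt file_text
  simp only [extract_here_doc_sql, extract_here_doc_sql_alt]
  set lines := PySem.Str.splitlines file_text with hlines
  rw [pvALoop_false]
  have hS : pvStarts lines = pvIdxFrom (fun x => PySem.Str.isIn "<<!" x) 0 lines := rfl
  have hE : pvEnds lines = pvIdxFrom (fun x => PySem.Str.strip x == "!") 0 lines := rfl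
  have hhead := pvIdxFrom_head (fun x => PySem.Str.isIn "<<!" x) lines 0
  rw [← hS] at hhead
  cases hf : List.findIdx? (fun x => PySem.Str.isIn "<<!" x) lines with
  | none =>
    rw [hf] at hhead
    simp at hhead
    have : pvStarts lines = [] := by
      cases h : pvStarts lines with
      | nil => rfl
      | cons a b => rw [h] at hhead; simp at hhead
    simp [this]
  | some i =>
    rw [hf] at hhead
    simp at hhead
    obtain ⟨rest, hrest⟩ : ∃ r, pvStarts lines = ((0 : Int) + (i : Int)) :: r := by
      cases h : pvStarts lines with
      | nil => rw [h] at hhead; simp at hhead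
      | cons a b => rw [h] at hhead; simp at hhead; exact ⟨b, by simp [hhead]⟩
    rw [hrest]
    simp only [hE]
    have hi : i < lines.length := by
      have := List.findIdx?_eq_some_iff_findIdx_eq.mp hf
      omega
    have he := pvFirstGt_spec (fun x => PySem.Str.strip x == "!") lines 0 i hi
    simp only [zero_add] at he ⊢
    rw [he]
    set j := List.findIdx (fun x => PySem.Str.strip x == "!") (lines.drop (i + 1)) with hj
    have hcast : ((i : Int) + 1 + (j : Int)) = (((i + 1 + j : Nat)) : Int) := by push_cast; ring
    have hcast2 : ((i : Int) + 1) = (((i + 1 : Nat)) : Int) := by push_cast; ring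
    rw [hcast, hcast2, PySem.List.slice_natCast]
    have htake : i + 1 + j - (i + 1) = j := by omega
    rw [htake]
    rw [pvALoop_true, takeWhile_eq_take_findIdx, ← hj]
    simp
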